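-- pv_equiv track=rewrite | github.com/Kamilp0/Trivium-master1 | bivium.py | clean_equation
-- ===== SOURCE A (Python) =====
-- def clean_equation(dirty_equation):
--     cleaned_equation = []
--
--     for monomial in dirty_equation:
--         if monomial in cleaned_equation:
--             cleaned_equation.remove(monomial)
--         else:
--             cleaned_equation.append(monomial)
--
--     return cleaned_equation
-- ===== SOURCE B (Python) =====
-- def clean_equation(dirty_equation):
--     # Two-stage tabulation instead of incremental toggling: one pass records
--     # each monomial's occurrence count and last position; then a comprehension
--     # keeps each monomial with an odd count, at its last occurrence (which is
--     # exactly where A's toggling list leaves it).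
--     counts = {}
--     last = {}
--     for i, monomial in enumerate(dirty_equation):
--         counts[monomial] = counts.get(monomial, 0) + 1
--         last[monomial] = i
--     return [monomial for i, monomial in enumerate(dirty_equation)
--             if counts[monomial] % 2 == 1 and last[monomial] == i]
-- ===== Notes on version B (the rewrite author's own statement) =====
-- stated objective: faster
-- what changed: Replaces A's incremental toggle list (linear membership test plus remove() per element) with a tabulate-then-select scheme: one pass records each monomial's count and last index in dicts, then a comprehension keeps odd-count monomials at their last occurrence.
import Mathlib
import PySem

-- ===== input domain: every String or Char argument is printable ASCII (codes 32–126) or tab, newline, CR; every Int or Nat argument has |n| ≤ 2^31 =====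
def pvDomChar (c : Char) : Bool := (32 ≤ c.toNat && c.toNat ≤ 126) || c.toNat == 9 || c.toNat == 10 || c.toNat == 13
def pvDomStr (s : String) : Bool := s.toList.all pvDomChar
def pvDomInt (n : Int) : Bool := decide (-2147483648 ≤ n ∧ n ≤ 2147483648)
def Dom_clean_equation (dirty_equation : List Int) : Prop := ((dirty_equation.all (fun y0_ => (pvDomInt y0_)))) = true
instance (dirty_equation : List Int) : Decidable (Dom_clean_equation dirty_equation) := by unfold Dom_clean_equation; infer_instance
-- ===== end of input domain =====

-- B replaces A's incremental toggle list (linear membership test and remove per element)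
-- by a tabulate-then-select pass: count and last position per monomial, then keep each
-- odd-count monomial at its last occurrence.

-- ===== PORT A =====
-- for monomial in dirty_equation: if in list remove it, else append it
def clean_equation (dirty_equation : List Int) : List Int :=
  dirty_equation.foldl
    (fun cleaned monomial =>
      if monomial ∈ cleaned then (PySem.List.remove? cleaned monomial).getD cleaned
      else cleaned ++ [monomial])
    []

-- ===== PORT B =====
-- one pass over enumerate builds (counts, last); then the comprehension keeps
-- odd-count monomials at their last index. counts[x] is a nonnegative count so
-- Lean's % agrees with Python's here; counts[x]/last[x] keys are always present
-- at lookup time, so getD's default is never used.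
def clean_equation_alt (dirty_equation : List Int) : List Int :=
  let tabs := (PySem.List.enumerate dirty_equation).foldl
      (fun (cl : PySem.Dict Int Int × PySem.Dict Int Int) p =>
        (cl.1.insert p.2 (cl.1.getD p.2 0 + 1), cl.2.insert p.2 p.1))
      (PySem.Dict.empty, PySem.Dict.empty)
  ((PySem.List.enumerate dirty_equation).filter
      (fun p => tabs.1.getD p.2 0 % 2 == 1 && tabs.2.getD p.2 0 == p.1)).map (·.2)

-- ===== PRECONDITION & SPEC =====
def Spec_clean_equation (dirty_equation : List Int) (out : List Int) : Prop := out = clean_equation_alt dirty_equation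
instance (dirty_equation : List Int) (out : List Int) : Decidable (Spec_clean_equation dirty_equation out) := by unfold Spec_clean_equation; infer_instance

-- ===== CLAIM (what is proved, stated in full; the proofs are below) =====
def Claim_equal_clean_equation : Prop := ∀ (dirty_equation : List Int), Dom_clean_equation dirty_equation → Spec_clean_equation dirty_equation (clean_equation dirty_equation)

-- ===== LEMMAS AND PROOFS =====

-- the "last index" table of B, in isolation
def pvLast (xs : List Int) : PySem.Dict Int Int :=
  (PySem.List.enumerate xs).foldl (fun d p => d.insert p.2 p.1) PySem.Dict.empty

-- B's selection predicate, with the counts table replaced by List.count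
def pvPred (xs : List Int) (p : Int × Int) : Bool :=
  ((xs.count p.2 : Int) % 2 == 1) && ((pvLast xs).getD p.2 0 == p.1)

-- B's result, characterised
def pvG (xs : List Int) : List Int :=
  ((PySem.List.enumerate xs).filter (pvPred xs)).map (·.2)

theorem pv_foldl_pair (l : List (Int × Int)) (a b : PySem.Dict Int Int) :
    l.foldl (fun cl p => (cl.1.insert p.2 (cl.1.getD p.2 0 + 1), cl.2.insert p.2 p.1)) (a, b)
      = (l.foldl (fun d p => d.insert p.2 (d.getD p.2 0 + 1)) a,
         l.foldl (fun d p => d.insert p.2 p.1) b) := by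
  induction l generalizing a b with
  | nil => rfl
  | cons p t ih => simpa using ih (a.insert p.2 (a.getD p.2 0 + 1)) (b.insert p.2 p.1)

theorem pv_foldl_enum_cnt (xs : List Int) (s : Int) (d : PySem.Dict Int Int) :
    (PySem.List.enumerate xs s).foldl (fun d p => d.insert p.2 (d.getD p.2 0 + 1)) d
      = xs.foldl (fun d x => d.insert x (d.getD x 0 + 1)) d := by
  induction xs generalizing s d with
  | nil => rfl
  | cons x t ih => simp [PySem.List.enumerate_cons, ih]

theorem pv_alt_eq (xs : List Int) : clean_equation_alt xs = pvG xs := by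
  unfold clean_equation_alt pvG pvPred pvLast
  simp only []
  rw [pv_foldl_pair, pv_foldl_enum_cnt, PySem.Dict.foldl_insert_getD_add_one_eq_counter]
  simp [PySem.Dict.getD_counter]

theorem pv_last_append (xs : List Int) (m : Int) :
    pvLast (xs ++ [m]) = (pvLast xs).insert m (xs.length : Int) := by
  unfold pvLast
  simp [PySem.List.enumerate_append, PySem.List.enumerate_cons, PySem.List.enumerate_nil]

theorem pv_enum_fst_lt (xs : List Int) (p : Int × Int)
    (hp : p ∈ PySem.List.enumerate xs) : 0 ≤ p.1 ∧ p.1 < (xs.length : Int) := by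
  obtain ⟨k, hk, hpe⟩ := (PySem.List.mem_enumerate_iff xs 0 p).mp hp
  subst hpe
  constructor <;> simp <;> omega

theorem pv_last_mem (xs : List Int) (m : Int) (h : m ∈ xs) :
    ((pvLast xs).getD m 0, m) ∈ PySem.List.enumerate xs := by
  induction xs using List.reverseRecOn with
  | nil => simp at h
  | append_singleton t y ih =>
    rw [pv_last_append, PySem.List.enumerate_append]
    by_cases hm : m = y
    · subst hm
      simp [PySem.Dict.getD_insert_self, PySem.List.enumerate_cons]
    · have hmt : m ∈ t := by
        rcases List.mem_append.mp h with h1 | h1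
        · exact h1
        · simp at h1; exact absurd h1 hm
      rw [PySem.Dict.getD_insert_of_ne]
      · exact List.mem_append_left _ (ih hmt)
      · exact hm

theorem pv_filter_fst_len (l : List (Int × Int)) (c : Int)
    (h : l.Pairwise (fun p q => p.1 < q.1)) :
    (l.filter (fun p => p.1 == c)).length ≤ 1 := by
  induction l with
  | nil => simp
  | cons p t ih =>
    rw [List.pairwise_cons] at h
    by_cases hp : p.1 = c
    · have ht : t.filter (fun q => q.1 == c) = [] := by
        apply List.filter_eq_nil_iff.mpr
        intro q hq
        have := h.1 q hq
        simp only [beq_iff_eq]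
        omega
      simp [hp, ht]
    · simp only [List.filter_cons, beq_iff_eq, hp, if_false]
      exact ih h.2

theorem pv_count_map_snd (l : List (Int × Int)) (m : Int) :
    (l.map (·.2)).count m = (l.filter (fun p => p.2 == m)).length := by
  induction l with
  | nil => rfl
  | cons p t ih =>
    by_cases hp : p.2 = m
    · simp [List.count_cons, hp, ih]
    · simp [List.filter_cons, hp, ih]

theorem pv_map_snd_filter (l : List (Int × Int)) (m : Int) :
    ((l.filter (fun p => !(p.2 == m))).map (·.2))
      = (l.map (·.2)).filter (fun y => !(y == m)) := by
  induction l with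
  | nil => rfl
  | cons p t ih =>
    by_cases hp : p.2 = m
    · simp [List.filter_cons, hp, ih]
    · simp [List.filter_cons, hp, ih]

theorem pv_filter_ne_eq_erase (ys : List Int) (m : Int) (h : ys.count m ≤ 1) :
    ys.filter (fun y => !(y == m)) = ys.erase m := by
  induction ys with
  | nil => rfl
  | cons y t ih =>
    by_cases hy : y = m
    · subst hy
      rw [List.count_cons_self] at h
      have h0 : t.count y = 0 := by omega
      have ht : t.filter (fun z => !(z == y)) = t := by
        apply List.filter_eq_self.mpr
        intro z hz
        have hzy : z ≠ y := fun e => (List.count_eq_zero.mp h0) (e ▸ hz)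
        simp [hzy]
      simp [ht]
    · have hc : t.count m ≤ 1 := by
        rw [List.count_cons] at h
        omega
      have hb : (!(y == m)) = true := by simp [hy]
      rw [List.filter_cons, hb, if_pos rfl, List.erase_cons_tail (by simp [hy]), ih hc]

theorem pv_count_pvG_le (xs : List Int) (m : Int) : (pvG xs).count m ≤ 1 := by
  unfold pvG
  rw [pv_count_map_snd, List.filter_filter]
  have hsub : List.Sublist
      ((PySem.List.enumerate xs).filter (fun p => (p.2 == m) && pvPred xs p))
      ((PySem.List.enumerate xs).filter (fun p => p.1 == (pvLast xs).getD m 0)) := by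
    apply List.monotone_filter_right
    intro p hp
    simp only [Bool.and_eq_true, beq_iff_eq, pvPred, Bool.and_eq_true] at hp ⊢
    obtain ⟨h2, _, h3⟩ := hp
    rw [← h2, h3]
  calc ((PySem.List.enumerate xs).filter (fun p => (p.2 == m) && pvPred xs p)).length
      ≤ ((PySem.List.enumerate xs).filter (fun p => p.1 == (pvLast xs).getD m 0)).length :=
        hsub.length_le
    _ ≤ 1 := pv_filter_fst_len _ _ (PySem.List.pairwise_lt_enumerate xs 0)

theorem pv_mem_pvG_of_odd (xs : List Int) (m : Int) (h : xs.count m % 2 = 1) :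
    m ∈ pvG xs := by
  have hmem : m ∈ xs := by
    by_contra hc
    rw [List.count_eq_zero.mpr hc] at h
    omega
  unfold pvG
  apply List.mem_map.mpr
  refine ⟨((pvLast xs).getD m 0, m), List.mem_filter.mpr ⟨pv_last_mem xs m hmem, ?_⟩, rfl⟩
  unfold pvPred
  simp only [Bool.and_eq_true, beq_iff_eq]
  exact ⟨by omega, trivial⟩

theorem pv_not_mem_pvG_of_even (xs : List Int) (m : Int) (h : xs.count m % 2 = 0) :
    m ∉ pvG xs := by
  intro hm
  obtain ⟨p, hp, hsnd⟩ := List.mem_map.mp hm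
  obtain ⟨_, hpred⟩ := List.mem_filter.mp hp
  unfold pvPred at hpred
  simp only [Bool.and_eq_true, beq_iff_eq, hsnd] at hpred
  omega

theorem pv_main (xs : List Int) : clean_equation xs = pvG xs := by
  induction xs using List.reverseRecOn with
  | nil => rfl
  | append_singleton t m ih =>
    -- A side: one more toggle step on clean_equation t = pvG t
    have hA : clean_equation (t ++ [m]) =
        (if m ∈ pvG t then (PySem.List.remove? (pvG t) m).getD (pvG t)
         else pvG t ++ [m]) := by
      unfold clean_equation
      rw [List.foldl_append]
      rw [show t.foldl (fun cleaned monomial =>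
            if monomial ∈ cleaned then (PySem.List.remove? cleaned monomial).getD cleaned
            else cleaned ++ [monomial]) [] = clean_equation t from rfl, ih]
      rfl
    -- B side: split the filtered enumeration at the new last pair
    have hEnum : PySem.List.enumerate (t ++ [m])
        = PySem.List.enumerate t ++ [((t.length : Int), m)] := by
      simp [PySem.List.enumerate_append, PySem.List.enumerate_cons, PySem.List.enumerate_nil]
    have hPredOld : ∀ p ∈ PySem.List.enumerate t,
        pvPred (t ++ [m]) p = (pvPred t p && !(p.2 == m)) := by
      intro p hp
      have hlt := pv_enum_fst_lt t p hp
      unfold pvPred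
      rw [pv_last_append]
      by_cases hpm : p.2 = m
      · rw [hpm, PySem.Dict.getD_insert_self]
        have h1 : (((t.length : Int)) == p.1) = false := by
          simp only [beq_eq_false_iff_ne, ne_eq]
          omega
        simp [h1]
      · rw [PySem.Dict.getD_insert]
        have hcnt : (t ++ [m]).count p.2 = t.count p.2 := by
          simp [List.count_append, List.count_singleton]
          exact fun e => hpm e.symm
        rw [hcnt]
        simp [hpm]
    have hPredNew : pvPred (t ++ [m]) ((t.length : Int), m)
        = (((t.count m : Int) + 1) % 2 == 1) := by
      unfold pvPred
      rw [pv_last_append, PySem.Dict.getD_insert_self]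
      have hcnt : (t ++ [m]).count m = t.count m + 1 := by
        simp [List.count_append]
      rw [hcnt]
      simp
    rcases Nat.mod_two_eq_zero_or_one (t.count m) with hpar | hpar
    · -- even: B appends m, A appends m
      have hm : m ∉ pvG t := pv_not_mem_pvG_of_even t m hpar
      rw [hA, if_neg hm]
      unfold pvG
      rw [hEnum, List.filter_append, List.map_append]
      have h1 : (PySem.List.enumerate t).filter (pvPred (t ++ [m]))
          = (PySem.List.enumerate t).filter (pvPred t) := by
        apply List.filter_congr
        intro p hp
        rw [hPredOld p hp]
        by_cases hpm : p.2 = m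
        · have : pvPred t p = false := by
            unfold pvPred
            rw [hpm]
            have : ((t.count m : Int) % 2 == 1) = false := by
              simp only [beq_eq_false_iff_ne, ne_eq]
              omega
            simp [this]
          simp [this]
        · simp [hpm]
      have h2 : pvPred (t ++ [m]) ((t.length : Int), m) = true := by
        rw [hPredNew]
        simp only [beq_iff_eq]
        omega
      rw [h1, List.filter_cons, h2]
      simp
    · -- odd: B drops the unique surviving m, A removes it
      have hm : m ∈ pvG t := pv_mem_pvG_of_odd t m hpar
      rw [hA, if_pos hm, PySem.List.remove?_eq_some_erase _ _ hm, Option.getD_some]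
      unfold pvG
      rw [hEnum, List.filter_append, List.map_append]
      have h1 : (PySem.List.enumerate t).filter (pvPred (t ++ [m]))
          = ((PySem.List.enumerate t).filter (pvPred t)).filter (fun p => !(p.2 == m)) := by
        rw [List.filter_filter]
        apply List.filter_congr
        intro p hp
        rw [hPredOld p hp, Bool.and_comm]
      have h2 : pvPred (t ++ [m]) ((t.length : Int), m) = false := by
        rw [hPredNew]
        simp only [beq_eq_false_iff_ne, ne_eq]
        omega
      rw [h1, List.filter_cons, h2]
      rw [pv_map_snd_filter, pv_filter_ne_eq_erase _ _ (by
        have := pv_count_pvG_le t m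
        unfold pvG at this
        exact this)]
      simp

-- ===== VERDICT (by name: the statement is the Claim_ definition above) =====
theorem clean_equation_spec : Claim_equal_clean_equation := by
  intro xs _
  show clean_equation xs = clean_equation_alt xs
  rw [pv_main, pv_alt_eq]
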